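-- pv_equiv track=rewrite | github.com/iammohdfazil/DSKE | ComparisonApproach.py | term_freq_in_tweets
-- ===== SOURCE A (Python) =====
-- def term_freq_in_tweets(tweets_words, tweets_words_list):
-- 	term_tweetcount_dict={}
--
-- 	for word in tweets_words:
-- 		term_freq=0
-- 		for tw_word_list in tweets_words_list:
-- 			if word in tw_word_list:
-- 				term_freq=term_freq+1
-- 		term_tweetcount_dict[word]=term_freq
-- 	return term_tweetcount_dict
-- ===== SOURCE B (Python) =====
-- def term_freq_in_tweets(tweets_words, tweets_words_list):
--     counts = {}
--     for tweet in tweets_words_list: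
--         for w in set(tweet):
--             counts[w] = counts.get(w, 0) + 1
--     return {word: counts.get(word, 0) for word in tweets_words}
-- ===== Notes on version B (the rewrite author's own statement) =====
-- stated objective: faster
-- what changed: Builds a document-frequency table in a single pass over the tweets (bumping each distinct word of a tweet once), then answers each queried word by O(1) lookup, instead of rescanning every tweet for every word.
import Mathlib
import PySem

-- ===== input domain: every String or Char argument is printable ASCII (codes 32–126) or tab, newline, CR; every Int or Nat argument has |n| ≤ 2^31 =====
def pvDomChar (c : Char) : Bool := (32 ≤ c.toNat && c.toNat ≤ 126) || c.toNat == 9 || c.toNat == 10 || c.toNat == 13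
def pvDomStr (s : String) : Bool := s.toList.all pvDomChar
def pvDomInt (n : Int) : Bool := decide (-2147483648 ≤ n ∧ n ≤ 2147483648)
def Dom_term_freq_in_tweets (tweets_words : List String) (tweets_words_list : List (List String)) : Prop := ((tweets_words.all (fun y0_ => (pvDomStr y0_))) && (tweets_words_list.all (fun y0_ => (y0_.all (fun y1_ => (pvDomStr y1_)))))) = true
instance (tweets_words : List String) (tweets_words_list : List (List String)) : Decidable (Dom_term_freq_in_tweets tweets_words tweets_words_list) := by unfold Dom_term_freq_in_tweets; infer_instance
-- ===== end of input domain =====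

-- B replaces A's per-word rescan of all tweets with one counting pass over the tweets plus O(1) lookups (faster).


-- ===== PORT A =====
def term_freq_in_tweets (tweets_words : List String) (tweets_words_list : List (List String)) : List (String × Int) :=
  (tweets_words.foldl
    (fun d word =>
      d.insert word
        (tweets_words_list.foldl
          (fun term_freq tw_word_list => if word ∈ tw_word_list then term_freq + 1 else term_freq)
          (0 : Int)))
    PySem.Dict.empty).items

-- ===== PORT B =====
def term_freq_in_tweets_alt (tweets_words : List String) (tweets_words_list : List (List String)) : List (String × Int) :=
  let counts : PySem.Dict String Int :=
    tweets_words_list.foldl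
      (fun d tweet => (PySem.Set.ofList tweet).foldl (fun d w => d.insert w (d.getD w 0 + 1)) d)
      PySem.Dict.empty
  (tweets_words.foldl (fun d word => d.insert word (counts.getD word 0)) PySem.Dict.empty).items

-- ===== PRECONDITION & SPEC =====
def Spec_term_freq_in_tweets (tweets_words : List String) (tweets_words_list : List (List String)) (out : List (String × Int)) : Prop := out = term_freq_in_tweets_alt tweets_words tweets_words_list
instance (tweets_words : List String) (tweets_words_list : List (List String)) (out : List (String × Int)) : Decidable (Spec_term_freq_in_tweets tweets_words tweets_words_list out) := by unfold Spec_term_freq_in_tweets; infer_instance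

-- ===== CLAIM (what is proved, stated in full; the proofs are below) =====
def Claim_equal_term_freq_in_tweets : Prop := ∀ (tweets_words : List String) (tweets_words_list : List (List String)), Dom_term_freq_in_tweets tweets_words tweets_words_list → Spec_term_freq_in_tweets tweets_words tweets_words_list (term_freq_in_tweets tweets_words tweets_words_list)

-- ===== LEMMAS AND PROOFS =====

-- one counting pass over one tweet bumps w's count by 1 iff w occurs in the tweet
theorem pv_tweet_step (t : List String) (d : PySem.Dict String Int) (w : String) :
    ((PySem.Set.ofList t).foldl (fun d w => d.insert w (d.getD w 0 + 1)) d).getD w 0 =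
      d.getD w 0 + (if w ∈ t then (1 : Int) else 0) := by
  rw [PySem.Dict.getD_foldl_insert_add_one]
  congr 1
  by_cases h : w ∈ t
  · have hm : w ∈ PySem.Set.ofList t := by simpa [PySem.Set.mem_ofList] using h
    have := List.count_eq_one_of_mem (PySem.Set.nodup_ofList t) hm
    simp [h]
  · have hm : w ∉ PySem.Set.ofList t := by simpa [PySem.Set.mem_ofList] using h
    simp [h, List.count_eq_zero_of_not_mem hm]

-- B's counter agrees with A's inner rescan, for every word
theorem pv_counts_eq (twl : List (List String)) (w : String) (d : PySem.Dict String Int) (a : Int) :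
    (twl.foldl (fun d tweet => (PySem.Set.ofList tweet).foldl (fun d w => d.insert w (d.getD w 0 + 1)) d) d).getD w 0
      - d.getD w 0
    = twl.foldl (fun acc t => if w ∈ t then acc + 1 else acc) a - a := by
  induction twl generalizing d a with
  | nil => simp
  | cons t ts ih =>
    simp only [List.foldl_cons]
    have h1 := ih ((PySem.Set.ofList t).foldl (fun d w => d.insert w (d.getD w 0 + 1)) d)
      (if w ∈ t then a + 1 else a)
    have h2 := pv_tweet_step t d w
    by_cases h : w ∈ t <;> simp [h] at h1 h2 ⊢ <;> omega

theorem pv_main (tweets_words : List String) (tweets_words_list : List (List String)) :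
    term_freq_in_tweets tweets_words tweets_words_list =
      term_freq_in_tweets_alt tweets_words tweets_words_list := by
  unfold term_freq_in_tweets term_freq_in_tweets_alt
  have hv : ∀ word : String,
      (tweets_words_list.foldl (fun acc t => if word ∈ t then acc + 1 else acc) (0 : Int)) =
      (tweets_words_list.foldl
        (fun d tweet => (PySem.Set.ofList tweet).foldl (fun d w => d.insert w (d.getD w 0 + 1)) d)
        PySem.Dict.empty).getD word 0 := by
    intro word
    have h := pv_counts_eq tweets_words_list word PySem.Dict.empty 0
    simp [PySem.Dict.getD_empty] at h
    omega
  have hf :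
      (fun (d : PySem.Dict String Int) (word : String) =>
        d.insert word
          (tweets_words_list.foldl
            (fun term_freq tw_word_list => if word ∈ tw_word_list then term_freq + 1 else term_freq) (0 : Int))) =
      (fun (d : PySem.Dict String Int) (word : String) =>
        d.insert word
          ((tweets_words_list.foldl
              (fun d tweet => (PySem.Set.ofList tweet).foldl (fun d w => d.insert w (d.getD w 0 + 1)) d)
              PySem.Dict.empty).getD word 0)) := by
    funext d word
    rw [hv word]
  simp only [hf]

-- ===== VERDICT (by name: the statement is the Claim_ definition above) =====
theorem term_freq_in_tweets_spec : Claim_equal_term_freq_in_tweets := by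
  intro tw twl _
  unfold Spec_term_freq_in_tweets
  exact pv_main tw twl
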